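-- pv_equiv track=rewrite | github.com/liqiushui/leetcode | python/String/S127.py | transform
-- ===== SOURCE A (Python) =====
-- def transform(beginWord, slist):
--     result = []
--     for j in range(len(beginWord)):
--         for i in range(97, 97+26):
--             rc = chr(i)
--             if rc != beginWord[j]:
--                 temp = beginWord[:j] + str(rc) + beginWord[j+1:]
--                 if temp in slist:
--                     result.append(temp)
--     return result
-- ===== SOURCE B (Python) =====
-- def transform(beginWord, slist):
--     n = len(beginWord)
--     kept = {}
--     for w in slist:
--         if len(w) == n:
--             diffs = [k for k in range(n) if w[k] != beginWord[k]]
--             if len(diffs) == 1: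
--                 j = diffs[0]
--                 c = w[j]
--                 if 'a' <= c <= 'z':
--                     kept[w] = (j, c)
--     return [kv[0] for kv in sorted(kept.items(), key=lambda kv: kv[1])]
-- ===== Notes on version B (the rewrite author's own statement) =====
-- stated objective: faster
-- what changed: Instead of generating all 26*len(beginWord) candidate words and linearly scanning slist for each ('temp in slist'), B makes one pass over slist keeping words that differ from beginWord in exactly one position with a lowercase letter there, dedups them with a dict, and sorts by (position, letter) to reproduce A's order.
import Mathlib
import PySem

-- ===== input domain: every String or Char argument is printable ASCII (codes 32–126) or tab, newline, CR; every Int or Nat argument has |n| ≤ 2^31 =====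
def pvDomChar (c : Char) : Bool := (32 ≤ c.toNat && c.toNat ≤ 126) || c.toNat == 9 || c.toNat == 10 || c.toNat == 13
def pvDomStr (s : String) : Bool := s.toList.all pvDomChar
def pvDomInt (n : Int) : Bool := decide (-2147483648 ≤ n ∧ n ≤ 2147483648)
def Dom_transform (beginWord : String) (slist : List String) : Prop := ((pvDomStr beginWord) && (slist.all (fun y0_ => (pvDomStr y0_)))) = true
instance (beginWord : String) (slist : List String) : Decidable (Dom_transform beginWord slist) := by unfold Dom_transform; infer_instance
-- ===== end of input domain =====

-- B replaces A's "generate all 26*len(beginWord) variants and scan slist for each" by one pass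
-- over slist keeping the words at Hamming distance 1 (lowercase letter at the differing spot),
-- deduplicated in a dict and sorted by (position, letter) to reproduce A's order (objective: faster, measured).

-- ===== PORT A =====
def transform (beginWord : String) (slist : List String) : List String :=
  let bw := beginWord.toList
  (PySem.List.pyRange 0 (bw.length : Int) 1).foldl (fun result j =>
    (PySem.List.pyRange 97 123 1).foldl (fun result i =>
      let rc := Char.ofNat i.toNat
      if rc ≠ PySem.List.pyGetD bw j ' ' then
        let temp := String.ofList
          (PySem.List.slice bw none (some j) ++ [rc] ++ PySem.List.slice bw (some (j + 1)) none)
        if temp ∈ slist then result ++ [temp] else result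
      else result) result) []

-- ===== PORT B =====
def transform_alt (beginWord : String) (slist : List String) : List String :=
  let bw := beginWord.toList
  let n := bw.length
  let kept : PySem.Dict String (Int × Char) :=
    slist.foldl (fun kept w =>
      let wl := w.toList
      if wl.length = n then
        let diffs := (PySem.List.pyRange 0 (n : Int) 1).filter
          (fun k => decide (PySem.List.pyGetD wl k ' ' ≠ PySem.List.pyGetD bw k ' '))
        if diffs.length = 1 then
          let j := PySem.List.pyGetD diffs 0 0
          let c := PySem.List.pyGetD wl j ' '
          if 'a' ≤ c ∧ c ≤ 'z' then kept.insert w (j, c) else kept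
        else kept
      else kept) PySem.Dict.empty
  (PySem.List.sorted2 kept.items (fun kv => kv.2.1) (fun kv => kv.2.2)).map (fun kv => kv.1)

-- ===== PRECONDITION & SPEC =====
def Spec_transform (beginWord : String) (slist : List String) (out : List String) : Prop := out = transform_alt beginWord slist
instance (beginWord : String) (slist : List String) (out : List String) : Decidable (Spec_transform beginWord slist out) := by unfold Spec_transform; infer_instance

-- ===== CLAIM (what is proved, stated in full; the proofs are below) =====
def Claim_equal_transform : Prop := ∀ (beginWord : String) (slist : List String), Dom_transform beginWord slist → Spec_transform beginWord slist (transform beginWord slist)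

-- ===== LEMMAS AND PROOFS =====

-- the lowercase alphabet, as A enumerates it
def lchars : List Char := (List.range 26).map (fun m => Char.ofNat (97 + m))

-- the word beginWord with position j replaced by c
def mkWord (bw : List Char) (j : Nat) (c : Char) : String :=
  String.ofList (bw.take j ++ [c] ++ bw.drop (j + 1))

-- A's output decorated with the (position, letter) key it was generated from
def genList (bw : List Char) (slist : List String) : List (String × Int × Char) :=
  (List.range bw.length).flatMap (fun j =>
    ((lchars.filter (fun c => decide (c ≠ bw.getD j ' ') && decide (mkWord bw j c ∈ slist))).map
      (fun c => (mkWord bw j c, ((j : Int), c)))))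

-- B's acceptance test and value, factored out of the fold body
def diffsI (bw wl : List Char) : List Int :=
  (PySem.List.pyRange 0 (bw.length : Int) 1).filter
    (fun k => decide (PySem.List.pyGetD wl k ' ' ≠ PySem.List.pyGetD bw k ' '))

def theC (bw wl : List Char) : Char :=
  PySem.List.pyGetD wl (PySem.List.pyGetD (diffsI bw wl) 0 0) ' '

def acceptB (bw : List Char) (w : String) : Bool :=
  decide (w.toList.length = bw.length) && decide ((diffsI bw w.toList).length = 1) &&
    decide ('a' ≤ theC bw w.toList ∧ theC bw w.toList ≤ 'z')

def valB (bw : List Char) (w : String) : Int × Char :=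
  (PySem.List.pyGetD (diffsI bw w.toList) 0 0, theC bw w.toList)

lemma if_if_append {α : Type} (a b : Prop) [Decidable a] [Decidable b] (x : List α) (t : α) :
    (if a then (if b then x ++ [t] else x) else x) = (if (decide a && decide b) = true then x ++ [t] else x) := by
  by_cases ha : a <;> by_cases hb : b <;> simp [ha, hb]

lemma transform_eq_genList (s : String) (slist : List String) :
    transform s slist = (genList s.toList slist).map (·.1) := by
  unfold transform genList
  simp only [PySem.List.pyRange_one]
  have h1 : ((s.toList.length : Int) - 0).toNat = s.toList.length := by omega
  have h2 : ((123 : Int) - 97).toNat = 26 := rfl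
  rw [h1, h2]
  simp only [List.foldl_map]
  have hcast : ∀ (k : Nat), ((0 : Int) + (k : Int)) = (k : Int) := by intro k; omega
  have hcast2 : ∀ (m : Nat), ((97 : Int) + (m : Int)).toNat = 97 + m := by intro m; omega
  simp only [hcast, PySem.List.pyGetD_natCast, PySem.List.slice_to_natCast, hcast2]
  have hsl : ∀ (k : Nat), PySem.List.slice s.toList (some ((k : Int) + 1)) none = s.toList.drop (k+1) := by
    intro k
    have : ((k : Int) + 1) = ((k + 1 : Nat) : Int) := by push_cast; ring
    rw [this, PySem.List.slice_from_natCast]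
  simp only [hsl]
  -- collapse the two ifs
  simp only [if_if_append]
  simp only [PySem.List.foldl_append_if]
  rw [PySem.List.foldl_append_eq_flatMap]
  simp only [List.map_flatMap, lchars, List.filter_map, List.map_map, mkWord, List.nil_append, Function.comp_def]
  rfl

lemma mem_genList (bw : List Char) (slist : List String) (p : String × Int × Char) :
    p ∈ genList bw slist ↔
      ∃ j, j < bw.length ∧ ∃ c, c ∈ lchars ∧ c ≠ bw.getD j ' ' ∧
        mkWord bw j c ∈ slist ∧ p = (mkWord bw j c, ((j : Int), c)) := by
  simp only [genList, List.mem_flatMap, List.mem_map, List.mem_filter, List.mem_range,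
    Bool.and_eq_true, decide_eq_true_eq]
  constructor
  · rintro ⟨j, hj, c, ⟨⟨hc, hne, hmem⟩, rfl⟩⟩
    exact ⟨j, hj, c, hc, hne, hmem, rfl⟩
  · rintro ⟨j, hj, c, hc, hne, hmem, rfl⟩
    exact ⟨j, hj, c, ⟨⟨hc, hne, hmem⟩, rfl⟩⟩

lemma lchars_pairwise : lchars.Pairwise (· < ·) := by
  have : ∀ (m m' : Nat), m < m' → m' < 26 → Char.ofNat (97 + m) < Char.ofNat (97 + m') := by
    intro m m' h h26
    rw [Char.lt_def]
    apply UInt32.lt_iff_toNat_lt.mpr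
    have e1 : (Char.ofNat (97 + m)).toNat = 97 + m := by
      rw [Char.toNat_ofNat, if_pos (Or.inl (by omega : 97 + m < 0xd800))]
    have e2 : (Char.ofNat (97 + m')).toNat = 97 + m' := by
      rw [Char.toNat_ofNat, if_pos (Or.inl (by omega : 97 + m' < 0xd800))]
    show (Char.ofNat (97 + m)).toNat < (Char.ofNat (97 + m')).toNat
    omega
  unfold lchars
  rw [List.pairwise_map]
  refine (List.pairwise_lt_range (n := 26)).imp_of_mem ?_
  intro a b ha hb hab
  exact this a b hab (List.mem_range.mp hb)

lemma lex_lt_left (j j' : Int) (c c' : Char) (h : j < j') : toLex (j, c) < toLex (j', c') := by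
  rw [Prod.Lex.lt_iff]; left; exact h

lemma lex_lt_right (j : Int) (c c' : Char) (h : c < c') : toLex (j, c) < toLex (j, c') := by
  rw [Prod.Lex.lt_iff]; right; exact ⟨rfl, h⟩

lemma pairwise_genList (bw : List Char) (slist : List String) :
    (genList bw slist).Pairwise (fun a b => toLex a.2 < toLex b.2) := by
  unfold genList
  rw [List.pairwise_flatMap]
  constructor
  · intro j _
    rw [List.pairwise_map]
    refine (lchars_pairwise.filter _).imp ?_
    intro c c' h
    exact lex_lt_right _ _ _ h
  · refine (List.pairwise_lt_range (n := bw.length)).imp ?_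
    intro j j' hjj x hx y hy
    rw [List.mem_map] at hx hy
    obtain ⟨c, _, rfl⟩ := hx
    obtain ⟨c', _, rfl⟩ := hy
    exact lex_lt_left _ _ _ _ (by exact_mod_cast hjj)

lemma sorted2_eq_sorted_lex {α : Type} (xs : List α) (k1 : α → Int) (k2 : α → Char) :
    PySem.List.sorted2 xs k1 k2 = PySem.List.sorted xs (fun a => toLex (k1 a, k2 a)) := by
  unfold PySem.List.sorted2 PySem.List.sorted
  simp only [if_neg (by simp : ¬ (false = true))]
  congr 1
  funext acc x
  congr 1
  funext a b
  rw [Bool.eq_iff_iff]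
  simp only [Bool.or_eq_true, Bool.and_eq_true, Bool.not_eq_true',
    decide_eq_true_eq, decide_eq_false_iff_not, Prod.Lex.lt_iff, ofLex_toLex]
  constructor
  · rintro (h | ⟨h1, h2⟩)
    · exact Or.inl h
    · rcases lt_trichotomy (k1 a) (k1 b) with h' | h' | h'
      · exact Or.inl h'
      · exact Or.inr ⟨h', h2⟩
      · exact absurd h' h1
  · rintro (h | ⟨h1, h2⟩)
    · exact Or.inl h
    · exact Or.inr ⟨by rw [h1]; exact lt_irrefl _, h2⟩

lemma mem_items_foldl_insert (accept : String → Bool) (val : String → Int × Char)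
    (l : List String) (d : PySem.Dict String (Int × Char))
    (hinv : ∀ q ∈ d.items, accept q.1 = true ∧ q.2 = val q.1) (p : String × Int × Char) :
    p ∈ (l.foldl (fun d w => if accept w then d.insert w (val w) else d) d).items ↔
      p ∈ d.items ∨ (p.1 ∈ l ∧ accept p.1 = true ∧ p.2 = val p.1) := by
  induction l generalizing d with
  | nil => simp
  | cons w t ih =>
    rw [List.foldl_cons]
    by_cases hw : accept w = true
    · rw [if_pos hw]
      have hinv' : ∀ q ∈ (d.insert w (val w)).items, accept q.1 = true ∧ q.2 = val q.1 := by
        intro q hq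
        rcases (PySem.Dict.mem_items_insert d w (val w) q).mp hq with rfl | ⟨hq', _⟩
        · exact ⟨hw, rfl⟩
        · exact hinv q hq'
      rw [ih _ hinv', PySem.Dict.mem_items_insert]
      constructor
      · rintro ((rfl | ⟨hd, hne⟩) | ⟨ht, ha, hv⟩)
        · exact Or.inr ⟨List.mem_cons_self, hw, rfl⟩
        · exact Or.inl hd
        · exact Or.inr ⟨List.mem_cons_of_mem _ ht, ha, hv⟩
      · rintro (hd | ⟨hm, ha, hv⟩)
        · by_cases hpw : p.1 = w
          · obtain ⟨_, hv⟩ := hinv p hd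
            left; left
            obtain ⟨p1, p2⟩ := p
            simp only at hpw hv
            subst hpw; rw [hv]
          · exact Or.inl (Or.inr ⟨hd, hpw⟩)
        · rcases List.mem_cons.mp hm with rfl | ht
          · left; left
            obtain ⟨p1, p2⟩ := p
            simp only at hv ⊢
            rw [hv]
          · exact Or.inr ⟨ht, ha, hv⟩
    · rw [if_neg hw, ih _ hinv]
      constructor
      · rintro (hd | ⟨ht, ha, hv⟩)
        · exact Or.inl hd
        · exact Or.inr ⟨List.mem_cons_of_mem _ ht, ha, hv⟩
      · rintro (hd | ⟨hm, ha, hv⟩)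
        · exact Or.inl hd
        · rcases List.mem_cons.mp hm with rfl | ht
          · exact absurd ha hw
          · exact Or.inr ⟨ht, ha, hv⟩

lemma nodup_keys_foldl_insert' (accept : String → Bool) (val : String → Int × Char)
    (l : List String) (d : PySem.Dict String (Int × Char)) (h : d.keys.Nodup) :
    (l.foldl (fun d w => if accept w then d.insert w (val w) else d) d).keys.Nodup := by
  induction l generalizing d with
  | nil => exact h
  | cons w t ih =>
    rw [List.foldl_cons]
    by_cases hw : accept w = true
    · rw [if_pos hw]; exact ih _ (PySem.Dict.nodup_keys_insert d w (val w) h)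
    · rw [if_neg hw]; exact ih _ h

lemma char_toNat_lchars (c : Char) : c ∈ lchars ↔ 97 ≤ c.toNat ∧ c.toNat ≤ 122 := by
  unfold lchars
  simp only [List.mem_map, List.mem_range]
  constructor
  · rintro ⟨m, hm, rfl⟩
    rw [Char.toNat_ofNat, if_pos (Or.inl (by omega : 97 + m < 0xd800))]
    omega
  · rintro ⟨h1, h2⟩
    refine ⟨c.toNat - 97, by omega, ?_⟩
    have : 97 + (c.toNat - 97) = c.toNat := by omega
    rw [this, Char.ofNat_toNat]

lemma lowercase_iff (c : Char) : ('a' ≤ c ∧ c ≤ 'z') ↔ 97 ≤ c.toNat ∧ c.toNat ≤ 122 := by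
  rw [Char.le_def, Char.le_def, UInt32.le_iff_toNat_le, UInt32.le_iff_toNat_le]
  constructor <;> exact fun h => h

lemma length_mk (bw : List Char) (j : Nat) (c : Char) (hj : j < bw.length) :
    (bw.take j ++ [c] ++ bw.drop (j + 1)).length = bw.length := by
  simp [List.length_take, List.length_drop]; omega

lemma getD_mk_self (bw : List Char) (j : Nat) (c : Char) (hj : j < bw.length) :
    (bw.take j ++ [c] ++ bw.drop (j + 1)).getD j ' ' = c := by
  rw [List.getD_eq_getElem?_getD, List.getElem?_append_left (by simp; omega),
    List.getElem?_append_right (by simp)]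
  simp [Nat.min_eq_left (le_of_lt hj)]

lemma getD_mk_ne (bw : List Char) (j k : Nat) (c : Char) (hj : j < bw.length) (hk : k ≠ j) :
    (bw.take j ++ [c] ++ bw.drop (j + 1)).getD k ' ' = bw.getD k ' ' := by
  rcases lt_or_gt_of_ne hk with h | h
  · rw [List.getD_eq_getElem?_getD, List.getElem?_append_left (by simp; omega),
      List.getElem?_append_left (by simp; omega), List.getElem?_take]
    simp [h, List.getD_eq_getElem?_getD]
  · rw [List.getD_eq_getElem?_getD, List.getElem?_append_right (by simp; omega)]
    have hlen : (bw.take j ++ [c]).length = j + 1 := by simp [Nat.min_eq_left (le_of_lt hj)]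
    rw [hlen, List.getElem?_drop]
    have : j + 1 + (k - (j + 1)) = k := by omega
    rw [this, List.getD_eq_getElem?_getD]

def diffsN (bw wl : List Char) : List Nat :=
  (List.range bw.length).filter (fun k => decide (wl.getD k ' ' ≠ bw.getD k ' '))

lemma diffs_eq (bw wl : List Char) :
    diffsI bw wl = (diffsN bw wl).map (fun k : Nat => (k : Int)) := by
  unfold diffsI
  rw [PySem.List.pyRange_one]
  have h1 : ((bw.length : Int) - 0).toNat = bw.length := by omega
  rw [h1]
  have h0 : (List.map (fun k : Nat => (0:Int) + (k:Int)) (List.range bw.length)) =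
      List.map (fun k : Nat => (k:Int)) (List.range bw.length) := by simp
  rw [h0, List.filter_map]
  unfold diffsN
  have hfil : List.filter
      ((fun k => decide (PySem.List.pyGetD wl k ' ' ≠ PySem.List.pyGetD bw k ' ')) ∘ (fun k : Nat => (k:Int)))
      (List.range bw.length) =
      List.filter (fun k => decide (wl.getD k ' ' ≠ bw.getD k ' ')) (List.range bw.length) := by
    apply List.filter_congr
    intro k _
    simp only [Function.comp_apply, PySem.List.pyGetD_natCast]
  rw [hfil]

lemma diffsN_mkWord (bw : List Char) (j : Nat) (c : Char) (hj : j < bw.length)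
    (hne : c ≠ bw.getD j ' ') :
    diffsN bw (mkWord bw j c).toList = [j] := by
  unfold diffsN
  have htl : (mkWord bw j c).toList = bw.take j ++ [c] ++ bw.drop (j + 1) := by simp [mkWord]
  rw [htl]
  have : ∀ k ∈ List.range bw.length,
      (decide ((bw.take j ++ [c] ++ bw.drop (j + 1)).getD k ' ' ≠ bw.getD k ' ')) = (k == j) := by
    intro k _
    by_cases hk : k = j
    · subst hk
      rw [getD_mk_self bw k c hj]
      simp only [beq_self_eq_true, decide_eq_true_eq]
      exact hne
    · rw [getD_mk_ne bw j k c hj hk]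
      simp [hk]
  rw [List.filter_congr this, List.filter_beq, List.count_range, if_pos hj, List.replicate_one]

lemma valB_mkWord (bw : List Char) (j : Nat) (c : Char) (hj : j < bw.length)
    (hne : c ≠ bw.getD j ' ') : valB bw (mkWord bw j c) = ((j : Int), c) := by
  unfold valB theC
  rw [diffs_eq, diffsN_mkWord bw j c hj hne]
  simp only [List.map_cons, List.map_nil]
  have h0 : PySem.List.pyGetD [(j : Int)] 0 0 = (j : Int) := by
    simp
  rw [h0, PySem.List.pyGetD_natCast]
  have htl : (mkWord bw j c).toList = bw.take j ++ [c] ++ bw.drop (j + 1) := by simp [mkWord]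
  rw [htl, getD_mk_self bw j c hj]

lemma acceptB_iff (bw : List Char) (w : String) :
    acceptB bw w = true ↔
      ∃ j, j < bw.length ∧ ∃ c, c ∈ lchars ∧ c ≠ bw.getD j ' ' ∧ w = mkWord bw j c := by
  unfold acceptB theC
  simp only [Bool.and_eq_true, decide_eq_true_eq]
  rw [diffs_eq]
  constructor
  · rintro ⟨⟨hlen, hdlen⟩, hlc⟩
    rw [List.length_map] at hdlen
    obtain ⟨j, hdj⟩ := List.length_eq_one_iff.mp hdlen
    have hjmem : j ∈ diffsN bw w.toList := by rw [hdj]; exact List.mem_singleton.mpr rfl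
    unfold diffsN at hjmem
    rw [List.mem_filter, List.mem_range] at hjmem
    obtain ⟨hjlt, hjne⟩ := hjmem
    rw [decide_eq_true_eq] at hjne
    rw [hdj] at hlc
    simp only [List.map_cons, List.map_nil] at hlc
    have h0 : PySem.List.pyGetD [(j : Int)] 0 0 = (j : Int) := by
      simp
    rw [h0, PySem.List.pyGetD_natCast] at hlc
    refine ⟨j, hjlt, w.toList.getD j ' ', ?_, hjne, ?_⟩
    · rw [char_toNat_lchars, ← lowercase_iff]; exact hlc
    · apply String.toList_inj.mp
      have htl : (mkWord bw j (w.toList.getD j ' ')).toList =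
          bw.take j ++ [w.toList.getD j ' '] ++ bw.drop (j + 1) := by simp [mkWord]
      rw [htl]
      apply List.ext_getElem
      · rw [hlen, length_mk bw j _ hjlt]
      · intro i hi1 hi2
        have hi : i < bw.length := by rwa [hlen] at hi1
        rw [← List.getD_eq_getElem _ ' ' hi1, ← List.getD_eq_getElem _ ' ' hi2]
        by_cases hij : i = j
        · subst hij
          rw [getD_mk_self bw i _ hi]
        · rw [getD_mk_ne bw j i _ hjlt hij]
          by_contra hdiff
          have : i ∈ diffsN bw w.toList := by
            unfold diffsN
            rw [List.mem_filter, List.mem_range]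
            exact ⟨hi, decide_eq_true hdiff⟩
          rw [hdj, List.mem_singleton] at this
          exact hij this
  · rintro ⟨j, hj, c, hclc, hne, rfl⟩
    rw [diffsN_mkWord bw j c hj hne]
    have htl : (mkWord bw j c).toList = bw.take j ++ [c] ++ bw.drop (j + 1) := by simp [mkWord]
    refine ⟨⟨?_, by simp⟩, ?_⟩
    · rw [htl]; exact length_mk bw j c hj
    · simp only [List.map_cons, List.map_nil]
      have h0 : PySem.List.pyGetD [(j : Int)] 0 0 = (j : Int) := by
        simp
      rw [h0, PySem.List.pyGetD_natCast, htl, getD_mk_self bw j c hj]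
      rw [lowercase_iff, ← char_toNat_lchars]
      exact hclc

lemma transform_alt_eq (s : String) (slist : List String) :
    transform_alt s slist = (genList s.toList slist).map (·.1) := by
  simp only [transform_alt]
  have hbody : (fun (kept : PySem.Dict String (Int × Char)) (w : String) =>
      let wl := w.toList
      if wl.length = s.toList.length then
        let diffs := (PySem.List.pyRange 0 (s.toList.length : Int) 1).filter
          (fun k => decide (PySem.List.pyGetD wl k ' ' ≠ PySem.List.pyGetD s.toList k ' '))
        if diffs.length = 1 then
          let j := PySem.List.pyGetD diffs 0 0
          let c := PySem.List.pyGetD wl j ' '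
          if 'a' ≤ c ∧ c ≤ 'z' then kept.insert w (j, c) else kept
        else kept
      else kept) =
      (fun d w => if acceptB s.toList w then d.insert w (valB s.toList w) else d) := by
    funext d w
    by_cases h1 : w.toList.length = s.toList.length
    · by_cases h2 : ((PySem.List.pyRange 0 (s.toList.length : Int) 1).filter
          (fun k => decide (PySem.List.pyGetD w.toList k ' ' ≠ PySem.List.pyGetD s.toList k ' '))).length = 1
      · by_cases h3 : 'a' ≤ PySem.List.pyGetD w.toList
            (PySem.List.pyGetD ((PySem.List.pyRange 0 (s.toList.length : Int) 1).filter
              (fun k => decide (PySem.List.pyGetD w.toList k ' ' ≠ PySem.List.pyGetD s.toList k ' '))) 0 0) ' ' ∧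
            PySem.List.pyGetD w.toList
            (PySem.List.pyGetD ((PySem.List.pyRange 0 (s.toList.length : Int) 1).filter
              (fun k => decide (PySem.List.pyGetD w.toList k ' ' ≠ PySem.List.pyGetD s.toList k ' '))) 0 0) ' ' ≤ 'z'
        · have hacc : acceptB s.toList w = true := by
            unfold acceptB theC diffsI
            rw [decide_eq_true h1, decide_eq_true h2, decide_eq_true h3]
            rfl
          rw [if_pos h1, if_pos h2, if_pos h3, if_pos hacc]
          rfl
        · have hacc : acceptB s.toList w = false := by
            unfold acceptB theC diffsI
            rw [decide_eq_true h1, decide_eq_true h2, decide_eq_false h3]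
            rfl
          rw [if_pos h1, if_pos h2, if_neg h3, hacc]
          simp
      · have hacc : acceptB s.toList w = false := by
          unfold acceptB theC diffsI
          rw [decide_eq_true h1, decide_eq_false h2]
          simp
        rw [if_pos h1, if_neg h2, hacc]
        simp
    · have hacc : acceptB s.toList w = false := by
        unfold acceptB theC diffsI
        rw [decide_eq_false h1]
        simp
      rw [if_neg h1, hacc]
      simp
  rw [hbody]
  have hmem : ∀ p, p ∈ (slist.foldl
      (fun d w => if acceptB s.toList w then d.insert w (valB s.toList w) else d)
      PySem.Dict.empty).items ↔ p ∈ genList s.toList slist := by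
    intro p
    rw [mem_items_foldl_insert _ _ _ _ (by intro q hq; simp [PySem.Dict.empty] at hq), mem_genList]
    constructor
    · rintro (h | ⟨hmem, hacc, hval⟩)
      · simp [PySem.Dict.empty] at h
      · obtain ⟨j, hj, c, hc, hne, hw⟩ := (acceptB_iff s.toList p.1).mp hacc
        refine ⟨j, hj, c, hc, hne, by rwa [← hw], ?_⟩
        obtain ⟨p1, p2⟩ := p
        simp only at hw hval ⊢
        rw [hw, hval, hw, valB_mkWord s.toList j c hj hne]
    · rintro ⟨j, hj, c, hc, hne, hmem, rfl⟩
      refine Or.inr ⟨hmem, ?_, ?_⟩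
      · exact (acceptB_iff s.toList _).mpr ⟨j, hj, c, hc, hne, rfl⟩
      · rw [valB_mkWord s.toList j c hj hne]
  have hnd1 : (slist.foldl
      (fun d w => if acceptB s.toList w then d.insert w (valB s.toList w) else d)
      PySem.Dict.empty).items.Nodup := by
    have := nodup_keys_foldl_insert' (acceptB s.toList) (valB s.toList) slist PySem.Dict.empty
      (by simp [PySem.Dict.empty, PySem.Dict.keys])
    exact this.of_map _
  have hnd2 : (genList s.toList slist).Nodup := by
    refine (pairwise_genList s.toList slist).imp ?_
    intro a b h heq
    rw [heq] at h
    exact lt_irrefl _ h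
  have hperm : (genList s.toList slist).Perm (slist.foldl
      (fun d w => if acceptB s.toList w then d.insert w (valB s.toList w) else d)
      PySem.Dict.empty).items := by
    rw [List.perm_ext_iff_of_nodup hnd2 hnd1]
    intro a
    rw [hmem]
  rw [sorted2_eq_sorted_lex]
  have hpw : (genList s.toList slist).Pairwise
      (fun a b => (fun kv : String × Int × Char => toLex (kv.2.1, kv.2.2)) a <
        (fun kv : String × Int × Char => toLex (kv.2.1, kv.2.2)) b) := by
    refine (pairwise_genList s.toList slist).imp ?_
    intro a b h
    simpa using h
  rw [PySem.List.sorted_eq_of_perm_of_pairwise_lt _ _ _ hperm hpw]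

-- ===== VERDICT (by name: the statement is the Claim_ definition above) =====
theorem transform_spec : Claim_equal_transform := by
  intro beginWord slist _
  unfold Spec_transform
  rw [transform_eq_genList, transform_alt_eq]
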